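-- pv_equiv track=rewrite | github.com/skybluesharkk/shim | pnu/2_2/자료구조/LAB03_카드셔플.py | allshuffle
-- ===== SOURCE A (Python) =====
-- def cardshuffle(list):
--     n = len(list)
--     _result = []
--     if n%2==0:
--         n2 = int(n)/2
--         l1 = list[0:int(n2)]
--         l2 = list[int(n2):n]
--         for i in range(int(n2)):
--             _result.append(l1[i])
--             _result.append(l2[i])
--     else:
--         n2 = int(n//2)
--         l1 = list[0:n2+1]
--         l2 = list[n2+1:n]
--         for i in range(int(n2)):
--             _result.append(l1[i])
--             _result.append(l2[i])
--         _result.append(l1[n2])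
--     return _result
--
-- def allshuffle(list):
--     sa = []
--     tmp = []
--     tmp.extend(list)
--     for i in list:
--         sa.append(cardshuffle(tmp))
--         tmp = cardshuffle(tmp)
--     return sa
-- ===== SOURCE B (Python) =====
-- def _shuffle_perm(n):
--     if n % 2 == 0:
--         return [j for i in range(n // 2) for j in (i, n // 2 + i)]
--     else:
--         return [j for i in range(n // 2) for j in (i, n // 2 + 1 + i)] + [n // 2]
--
-- def allshuffle(list):
--     n = len(list)
--     perm = _shuffle_perm(n)
--     out = []
--     cur = list
--     for _ in range(n):
--         cur = [cur[p] for p in perm]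
--         out.append(cur)
--     return out
-- ===== Notes on version B (the rewrite author's own statement) =====
-- stated objective: alternative
-- what changed: B computes the shuffle permutation once as an index table and produces each of the n results by a single index-gather over the previous list, instead of A's per-iteration slicing into two halves and rebuilding by appending pairs (and A calls cardshuffle twice per iteration).
import Mathlib
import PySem

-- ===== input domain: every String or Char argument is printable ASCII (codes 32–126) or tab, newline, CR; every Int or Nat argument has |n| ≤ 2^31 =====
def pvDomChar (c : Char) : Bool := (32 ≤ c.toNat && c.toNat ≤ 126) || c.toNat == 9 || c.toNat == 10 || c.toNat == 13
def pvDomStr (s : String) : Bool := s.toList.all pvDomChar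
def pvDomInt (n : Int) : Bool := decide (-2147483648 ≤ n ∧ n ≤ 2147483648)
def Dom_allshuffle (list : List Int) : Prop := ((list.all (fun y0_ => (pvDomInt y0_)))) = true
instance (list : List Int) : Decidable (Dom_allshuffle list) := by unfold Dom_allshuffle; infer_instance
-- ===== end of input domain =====

-- B precomputes the shuffle permutation once as an index table and applies it by gather n times,
-- replacing A's repeated split-and-interleave on values (objective: alternative decomposition).

-- ===== PORT A =====
-- literal port of cardshuffle: split into halves, interleave by an index loop
def cardshuffle (list : List Int) : List Int :=
  let n : Int := (list.length : Int)
  if PySem.Int.mod n 2 = 0 then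
    -- n2 = int(n)/2 is a Python float; with n even (and n ≤ 2^31) it is exact, so int(n2) = n // 2
    let n2 : Int := PySem.Int.floordiv n 2
    let l1 := PySem.List.slice list (some 0) (some n2)
    let l2 := PySem.List.slice list (some n2) (some n)
    (PySem.List.pyRange 0 n2 1).foldl
      (fun acc i => acc ++ [PySem.List.pyGetD l1 i 0, PySem.List.pyGetD l2 i 0]) []
  else
    let n2 : Int := PySem.Int.floordiv n 2
    let l1 := PySem.List.slice list (some 0) (some (n2 + 1))
    let l2 := PySem.List.slice list (some (n2 + 1)) (some n)
    ((PySem.List.pyRange 0 n2 1).foldl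
      (fun acc i => acc ++ [PySem.List.pyGetD l1 i 0, PySem.List.pyGetD l2 i 0]) [])
      ++ [PySem.List.pyGetD l1 n2 0]

def allshuffle (list : List Int) : List (List Int) :=
  (list.foldl
    (fun (st : List (List Int) × List Int) _ =>
      (st.1 ++ [cardshuffle st.2], cardshuffle st.2))
    ([], [] ++ list)).1

-- ===== PORT B =====
-- the shuffle permutation as an index table over range(n)
def shufflePerm (n : Int) : List Int :=
  if PySem.Int.mod n 2 = 0 then
    (PySem.List.pyRange 0 (PySem.Int.floordiv n 2) 1).flatMap
      (fun i => [i, PySem.Int.floordiv n 2 + i])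
  else
    ((PySem.List.pyRange 0 (PySem.Int.floordiv n 2) 1).flatMap
      (fun i => [i, PySem.Int.floordiv n 2 + 1 + i]))
      ++ [PySem.Int.floordiv n 2]

def allshuffle_alt (list : List Int) : List (List Int) :=
  let n : Int := (list.length : Int)
  let perm := shufflePerm n
  ((PySem.List.pyRange 0 n 1).foldl
    (fun (st : List (List Int) × List Int) _ =>
      let nxt := perm.map (fun p => PySem.List.pyGetD st.2 p 0)
      (st.1 ++ [nxt], nxt))
    ([], list)).1

-- ===== PRECONDITION & SPEC =====
def Spec_allshuffle (list : List Int) (out : List (List Int)) : Prop := out = allshuffle_alt list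
instance (list : List Int) (out : List (List Int)) : Decidable (Spec_allshuffle list out) := by unfold Spec_allshuffle; infer_instance

-- ===== CLAIM (what is proved, stated in full; the proofs are below) =====
def Claim_equal_allshuffle : Prop := ∀ (list : List Int), Dom_allshuffle list → Spec_allshuffle list (allshuffle list)

-- ===== LEMMAS AND PROOFS =====

-- the loop bodies of the two ports, as named step functions
def stepA : List (List Int) × List Int → List (List Int) × List Int :=
  fun st => (st.1 ++ [cardshuffle st.2], cardshuffle st.2)

def stepB (N : Nat) : List (List Int) × List Int → List (List Int) × List Int :=
  fun st =>
    (st.1 ++ [(shufflePerm (N : Int)).map (fun p => PySem.List.pyGetD st.2 p 0)],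
     (shufflePerm (N : Int)).map (fun p => PySem.List.pyGetD st.2 p 0))

-- A's cardshuffle IS the gather by shufflePerm
lemma cardshuffle_eq (xs : List Int) :
    cardshuffle xs
      = (shufflePerm (xs.length : Int)).map (fun p => PySem.List.pyGetD xs p 0) := by
  have hmod : PySem.Int.mod (xs.length : Int) 2 = ((xs.length % 2 : Nat) : Int) := by
    exact_mod_cast PySem.Int.mod_natCast xs.length 2
  have hdiv : PySem.Int.floordiv (xs.length : Int) 2 = ((xs.length / 2 : Nat) : Int) := by
    exact_mod_cast PySem.Int.floordiv_natCast xs.length 2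
  by_cases h : xs.length % 2 = 0
  · -- even branch
    have hyes : PySem.Int.mod (xs.length : Int) 2 = 0 := by rw [hmod, h]; norm_num
    simp only [cardshuffle, shufflePerm, if_pos hyes, hdiv,
      PySem.List.foldl_append_eq_flatMap, List.nil_append, List.map_flatMap]
    apply List.flatMap_congr
    intro i hi
    rw [PySem.List.mem_pyRange_one] at hi
    lift i to ℕ using hi.1 with k
    have hk : k < xs.length / 2 := by exact_mod_cast hi.2
    have h1 : PySem.List.slice xs (some 0) (some ((xs.length / 2 : Nat) : Int))
        = xs.take (xs.length / 2) := by
      rw [PySem.List.slice_zero_start, PySem.List.slice_to_natCast]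
    have h2 : PySem.List.slice xs (some ((xs.length / 2 : Nat) : Int)) (some (xs.length : Int))
        = xs.drop (xs.length / 2) := by
      rw [PySem.List.slice_natCast, List.take_of_length_le (by simp)]
    rw [h1, h2]
    have hc : ((xs.length / 2 : Nat) : Int) + (k : Int) = ((xs.length / 2 + k : Nat) : Int) := by
      push_cast; ring
    rw [hc]
    simp only [PySem.List.pyGetD_natCast, List.map_cons, List.map_nil]
    congr 1
    · simp [List.getD, hk]
    · congr 1
      simp [List.getD]
  · -- odd branch
    have h1m : xs.length % 2 = 1 := Nat.mod_two_eq_zero_or_one xs.length |>.resolve_left h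
    have hne : ¬ (PySem.Int.mod (xs.length : Int) 2 = 0) := by rw [hmod, h1m]; norm_num
    simp only [cardshuffle, shufflePerm, if_neg hne, hdiv,
      PySem.List.foldl_append_eq_flatMap, List.nil_append, List.map_append, List.map_flatMap]
    have hcast1 : ((xs.length / 2 : Nat) : Int) + 1 = ((xs.length / 2 + 1 : Nat) : Int) := by
      push_cast; ring
    have h1 : PySem.List.slice xs (some 0) (some (((xs.length / 2 : Nat) : Int) + 1))
        = xs.take (xs.length / 2 + 1) := by
      rw [hcast1, PySem.List.slice_zero_start, PySem.List.slice_to_natCast]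
    have h2 : PySem.List.slice xs (some (((xs.length / 2 : Nat) : Int) + 1)) (some (xs.length : Int))
        = xs.drop (xs.length / 2 + 1) := by
      rw [hcast1, PySem.List.slice_natCast, List.take_of_length_le (by simp)]
    rw [h1, h2]
    congr 1
    · apply List.flatMap_congr
      intro i hi
      rw [PySem.List.mem_pyRange_one] at hi
      lift i to ℕ using hi.1 with k
      have hk : k < xs.length / 2 := by exact_mod_cast hi.2
      have hc : ((xs.length / 2 : Nat) : Int) + 1 + (k : Int)
          = ((xs.length / 2 + 1 + k : Nat) : Int) := by push_cast; ring
      rw [hc]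
      simp only [PySem.List.pyGetD_natCast, List.map_cons, List.map_nil]
      congr 1
      · simp [List.getD, hk.le]
      · congr 1
        simp [List.getD]
    · simp only [PySem.List.pyGetD_natCast, List.map_cons, List.map_nil]
      congr 1
      simp [List.getD]

lemma shufflePerm_length (m : Nat) : (shufflePerm (m : Int)).length = m := by
  have hmod : PySem.Int.mod (m : Int) 2 = ((m % 2 : Nat) : Int) := by
    exact_mod_cast PySem.Int.mod_natCast m 2
  have hdiv : PySem.Int.floordiv (m : Int) 2 = ((m / 2 : Nat) : Int) := by
    exact_mod_cast PySem.Int.floordiv_natCast m 2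
  by_cases h : m % 2 = 0
  · have hyes : PySem.Int.mod (m : Int) 2 = 0 := by rw [hmod, h]; norm_num
    simp only [shufflePerm, if_pos hyes, hdiv]
    simp [List.length_flatMap, List.map_const', PySem.List.length_pyRange_one]
    omega
  · have h1m : m % 2 = 1 := Nat.mod_two_eq_zero_or_one m |>.resolve_left h
    have hne : ¬ (PySem.Int.mod (m : Int) 2 = 0) := by rw [hmod, h1m]; norm_num
    simp only [shufflePerm, if_neg hne, hdiv]
    simp [List.length_flatMap, List.map_const', PySem.List.length_pyRange_one]
    omega

-- a fold whose body ignores the element is an iterate of the body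
lemma foldl_const_iterate {α σ : Type} (f : σ → σ) :
    ∀ (L : List α) (st : σ), L.foldl (fun s _ => f s) st = f^[L.length] st := by
  intro L
  induction L with
  | nil => intro st; simp
  | cons x t ih => intro st; simp [List.foldl_cons, ih, Function.iterate_succ_apply]

-- the two loop bodies agree and preserve the length invariant
lemma iterate_eq (N : Nat) :
    ∀ (k : Nat) (st : List (List Int) × List Int), st.2.length = N →
      stepA^[k] st = (stepB N)^[k] st := by
  intro k
  induction k with
  | zero => intro st _; rfl
  | succ k ih =>
    intro st h
    have hcs : cardshuffle st.2
        = (shufflePerm (N : Int)).map (fun p => PySem.List.pyGetD st.2 p 0) := by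
      rw [cardshuffle_eq, h]
    have hstep : stepA st = stepB N st := by simp [stepA, stepB, hcs]
    have h2 : (stepA st).2.length = N := by
      simp [stepA, hcs, shufflePerm_length]
    rw [Function.iterate_succ_apply, Function.iterate_succ_apply, ih (stepA st) h2, hstep]

-- ===== VERDICT (by name: the statement is the Claim_ definition above) =====
theorem allshuffle_spec : Claim_equal_allshuffle := by
  intro list _
  unfold Spec_allshuffle allshuffle allshuffle_alt
  simp only [List.nil_append]
  show (List.foldl (fun (s : List (List Int) × List Int) (_ : Int) => stepA s) ([], list) list).1
      = (List.foldl (fun (s : List (List Int) × List Int) (_ : Int) => stepB list.length s)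
          ([], list) (PySem.List.pyRange 0 (list.length : Int) 1)).1
  rw [foldl_const_iterate stepA list ([], list),
      foldl_const_iterate (stepB list.length) (PySem.List.pyRange 0 (list.length : Int) 1)
        ([], list)]
  rw [iterate_eq list.length list.length ([], list) rfl]
  congr 2
  simp [PySem.List.length_pyRange_one]
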